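-- pv_equiv track=rewrite | github.com/p4lm4d3v/genetic-splicer | cli/src/lib/data/di_genotype.py | sortAllelesStr
-- ===== SOURCE A (Python) =====
-- def sortAllelesStr(alleles: str) -> str:
--     (a1, a2, b1, b2) = ["", "", "", ""]
--     for allele in list(alleles):
--         match allele:
--             case "A":
--                 a1 += allele
--             case "a":
--                 a2 += allele
--             case "B":
--                 b1 += allele
--             case "b":
--                 b2 += allele
--     return a1 + a2 + b1 + b2
-- ===== SOURCE B (Python) =====
-- def sortAllelesStr(alleles: str) -> str:
--     return "".join(sorted((c for c in alleles if c in "AaBb"), key="AaBb".index))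
-- ===== Notes on version B (the rewrite author's own statement) =====
-- stated objective: idiomatic
-- what changed: Replaces the four-bucket single-pass string concatenation with a one-liner: filter to the alleles in "AaBb" and stable-sort them by their priority index, then join.
import Mathlib
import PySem

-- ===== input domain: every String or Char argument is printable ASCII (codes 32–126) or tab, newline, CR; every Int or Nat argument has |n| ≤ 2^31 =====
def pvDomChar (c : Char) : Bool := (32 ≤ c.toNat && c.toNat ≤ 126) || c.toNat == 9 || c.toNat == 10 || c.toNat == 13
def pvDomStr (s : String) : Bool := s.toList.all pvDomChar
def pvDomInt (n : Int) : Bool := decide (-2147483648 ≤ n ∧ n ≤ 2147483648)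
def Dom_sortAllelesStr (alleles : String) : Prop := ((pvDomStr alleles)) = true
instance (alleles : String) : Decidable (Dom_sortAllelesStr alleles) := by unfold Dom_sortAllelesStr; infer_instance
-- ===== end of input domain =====

-- B replaces A's four-bucket single-pass concatenation by filtering to the alleles in "AaBb"
-- and stable-sorting them by their priority index ("AaBb".index), then joining (more idiomatic).


-- ===== PORT A =====
-- Python strings are modelled as their character lists (String.mk/toList); 'a1 += allele' is 'a1 ++ [allele]'.
def sortAllelesStr (alleles : String) : String :=
  let st := alleles.toList.foldl
    (fun (st : List Char × List Char × List Char × List Char) allele =>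
      let (a1, a2, b1, b2) := st
      if allele = 'A' then (a1 ++ [allele], a2, b1, b2)
      else if allele = 'a' then (a1, a2 ++ [allele], b1, b2)
      else if allele = 'B' then (a1, a2, b1 ++ [allele], b2)
      else if allele = 'b' then (a1, a2, b1, b2 ++ [allele])
      else (a1, a2, b1, b2))
    ([], [], [], [])
  String.mk (st.1 ++ st.2.1 ++ st.2.2.1 ++ st.2.2.2)

-- ===== PORT B =====
-- key = "AaBb".index(c); every kept c occurs in "AaBb", so str.index agrees with Chars.find (no ValueError).
def pvKeyB (c : Char) : Int := PySem.Chars.find ['A', 'a', 'B', 'b'] [c]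

def sortAllelesStr_alt (alleles : String) : String :=
  String.mk (PySem.List.sorted
    (alleles.toList.filter (fun c => PySem.Chars.isIn [c] ['A', 'a', 'B', 'b'])) pvKeyB false)

-- ===== PRECONDITION & SPEC =====
def Spec_sortAllelesStr (alleles : String) (out : String) : Prop := out = sortAllelesStr_alt alleles
instance (alleles : String) (out : String) : Decidable (Spec_sortAllelesStr alleles out) := by unfold Spec_sortAllelesStr; infer_instance

-- ===== CLAIM (what is proved, stated in full; the proofs are below) =====
def Claim_equal_sortAllelesStr : Prop := ∀ (alleles : String), Dom_sortAllelesStr alleles → Spec_sortAllelesStr alleles (sortAllelesStr alleles)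

-- ===== LEMMAS AND PROOFS =====

-- A's loop appends each character to the filter-bucket of its letter.
theorem pvLoopA (l a1 a2 b1 b2 : List Char) :
    l.foldl
      (fun (st : List Char × List Char × List Char × List Char) allele =>
        let (a1, a2, b1, b2) := st
        if allele = 'A' then (a1 ++ [allele], a2, b1, b2)
        else if allele = 'a' then (a1, a2 ++ [allele], b1, b2)
        else if allele = 'B' then (a1, a2, b1 ++ [allele], b2)
        else if allele = 'b' then (a1, a2, b1, b2 ++ [allele])
        else (a1, a2, b1, b2))
      (a1, a2, b1, b2)
      = (a1 ++ l.filter (· == 'A'), a2 ++ l.filter (· == 'a'),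
         b1 ++ l.filter (· == 'B'), b2 ++ l.filter (· == 'b')) := by
  induction l generalizing a1 a2 b1 b2 with
  | nil => simp
  | cons c t ih =>
    by_cases hA : c = 'A'
    · simp [hA, ih]
    · by_cases ha : c = 'a'
      · simp [ha, ih]
      · by_cases hB : c = 'B'
        · simp [hB, ih]
        · by_cases hb : c = 'b'
          · simp [hb, ih]
          · simp [hA, ha, hB, hb, ih]

theorem pvInsertBy_skip {α : Type} (before : α → α → Bool) (x : α) (l r : List α)
    (h : ∀ y ∈ l, before x y = false) :
    PySem.List.insertBy before x (l ++ r) = l ++ PySem.List.insertBy before x r := by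
  induction l with
  | nil => simp
  | cons y ys ih =>
    have hy : before x y = false := h y (by simp)
    simp [PySem.List.insertBy, hy, ih (fun z hz => h z (by simp [hz]))]

theorem pvInsertBy_here {α : Type} (before : α → α → Bool) (x : α) (r : List α)
    (h : ∀ y ∈ r, before x y = true) :
    PySem.List.insertBy before x r = x :: r := by
  cases r with
  | nil => simp [PySem.List.insertBy]
  | cons y ys => simp [PySem.List.insertBy, h y (by simp)]

theorem pvMemBucket {m : List Char} {c y : Char} (h : y ∈ m.filter (· == c)) : y = c := by
  have := (List.mem_filter.mp h).2
  exact eq_of_beq this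

-- stable sort by priority = the four buckets in priority order
theorem pvInsertBy_last {α : Type} (before : α → α → Bool) (x : α) (l : List α)
    (h : ∀ y ∈ l, before x y = false) :
    PySem.List.insertBy before x l = l ++ [x] := by
  induction l with
  | nil => simp [PySem.List.insertBy]
  | cons y ys ih =>
    simp [PySem.List.insertBy, h y (by simp), ih (fun z hz => h z (by simp [hz]))]

theorem pvBuckets (m : List Char) (h : ∀ x ∈ m, x = 'A' ∨ x = 'a' ∨ x = 'B' ∨ x = 'b') :
    PySem.List.sorted m pvKeyB false
      = m.filter (· == 'A') ++ m.filter (· == 'a') ++ m.filter (· == 'B') ++ m.filter (· == 'b') := by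
  induction m using List.reverseRecOn with
  | nil => simp [PySem.List.sorted_eq_foldl_insertBy]
  | append_singleton t x ih =>
    have ht : ∀ x ∈ t, x = 'A' ∨ x = 'a' ∨ x = 'B' ∨ x = 'b' :=
      fun z hz => h z (by simp [hz])
    have hx := h x (by simp)
    have hs : PySem.List.sorted (t ++ [x]) pvKeyB false
        = PySem.List.insertBy (fun a b => decide (pvKeyB a < pvKeyB b)) x
            (PySem.List.sorted t pvKeyB false) := by
      simp [PySem.List.sorted_eq_foldl_insertBy]
    rw [hs, ih ht]
    set FA := t.filter (· == 'A') with hFA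
    set Fa := t.filter (· == 'a') with hFa
    set FB := t.filter (· == 'B') with hFB
    set Fb := t.filter (· == 'b') with hFb
    have pureA : ∀ y ∈ FA, y = 'A' := fun y hy => pvMemBucket (hFA ▸ hy)
    have purea : ∀ y ∈ Fa, y = 'a' := fun y hy => pvMemBucket (hFa ▸ hy)
    have pureB : ∀ y ∈ FB, y = 'B' := fun y hy => pvMemBucket (hFB ▸ hy)
    have pureb : ∀ y ∈ Fb, y = 'b' := fun y hy => pvMemBucket (hFb ▸ hy)
    rcases hx with hx | hx | hx | hx <;> subst hx <;>
      simp only [List.append_assoc]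
    · rw [pvInsertBy_skip _ _ FA (Fa ++ (FB ++ Fb))
          (fun y hy => by rw [pureA y hy]; decide),
        pvInsertBy_here _ _ _ (fun y hy => by
          simp only [List.mem_append] at hy
          rcases hy with hy | hy | hy
          · rw [purea y hy]; decide
          · rw [pureB y hy]; decide
          · rw [pureb y hy]; decide)]
      simp [List.filter_append, hFA, hFa, hFB, hFb]
    · rw [show FA ++ (Fa ++ (FB ++ Fb)) = (FA ++ Fa) ++ (FB ++ Fb) by simp,
        pvInsertBy_skip _ _ (FA ++ Fa) (FB ++ Fb)
          (fun y hy => by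
            simp only [List.mem_append] at hy
            rcases hy with hy | hy
            · rw [pureA y hy]; decide
            · rw [purea y hy]; decide),
        pvInsertBy_here _ _ _ (fun y hy => by
          simp only [List.mem_append] at hy
          rcases hy with hy | hy
          · rw [pureB y hy]; decide
          · rw [pureb y hy]; decide)]
      simp [List.filter_append, hFA, hFa, hFB, hFb]
    · rw [show FA ++ (Fa ++ (FB ++ Fb)) = (FA ++ Fa ++ FB) ++ Fb by simp,
        pvInsertBy_skip _ _ (FA ++ Fa ++ FB) Fb
          (fun y hy => by
            simp only [List.mem_append] at hy
            rcases hy with (hy | hy) | hy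
            · rw [pureA y hy]; decide
            · rw [purea y hy]; decide
            · rw [pureB y hy]; decide),
        pvInsertBy_here _ _ _ (fun y hy => by rw [pureb y hy]; decide)]
      simp [List.filter_append, hFA, hFa, hFB, hFb]
    · rw [pvInsertBy_last _ _ (FA ++ (Fa ++ (FB ++ Fb)))
          (fun y hy => by
            simp only [List.mem_append] at hy
            rcases hy with hy | hy | hy | hy
            · rw [pureA y hy]; decide
            · rw [purea y hy]; decide
            · rw [pureB y hy]; decide
            · rw [pureb y hy]; decide)]
      simp [List.filter_append, hFA, hFa, hFB, hFb]

theorem pvP_iff (c : Char) :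
    PySem.Chars.isIn [c] ['A', 'a', 'B', 'b'] = true ↔ (c = 'A' ∨ c = 'a' ∨ c = 'B' ∨ c = 'b') := by
  rw [PySem.Chars.isIn_iff_infix]
  constructor
  · intro hinf
    have hmem : c ∈ ['A', 'a', 'B', 'b'] := hinf.mem (by simp)
    simpa using hmem
  · rintro (h | h | h | h) <;> subst h <;> decide

theorem pvFilterBucket (l : List Char) (c : Char)
    (hc : PySem.Chars.isIn [c] ['A', 'a', 'B', 'b'] = true) :
    (l.filter (fun x => PySem.Chars.isIn [x] ['A', 'a', 'B', 'b'])).filter (· == c)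
      = l.filter (· == c) := by
  rw [List.filter_filter]
  apply List.filter_congr
  intro x _
  by_cases hx : x = c
  · subst hx; simp [hc]
  · simp [hx]

-- ===== VERDICT (by name: the statement is the Claim_ definition above) =====
theorem sortAllelesStr_spec : Claim_equal_sortAllelesStr := by
  intro alleles _
  unfold Spec_sortAllelesStr sortAllelesStr sortAllelesStr_alt
  rw [pvLoopA]
  have h : ∀ x ∈ alleles.toList.filter (fun c => PySem.Chars.isIn [c] ['A', 'a', 'B', 'b']),
      x = 'A' ∨ x = 'a' ∨ x = 'B' ∨ x = 'b' := by
    intro x hx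
    exact (pvP_iff x).mp (List.mem_filter.mp hx).2
  rw [pvBuckets _ h]
  rw [pvFilterBucket _ _ (by decide), pvFilterBucket _ _ (by decide),
      pvFilterBucket _ _ (by decide), pvFilterBucket _ _ (by decide)]
  simp
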